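-- pv_equiv track=rewrite | github.com/Shehan-Fdo/PXL-Compressor | pxl.py | find_substitution_byte
-- ===== SOURCE A (Python) =====
-- def find_substitution_byte(data, pair_to_replace):
--     # (This function is the same as before)
--     used_bytes = set(data)
--     if pair_to_replace:
--         used_bytes.add(pair_to_replace[0])
--         used_bytes.add(pair_to_replace[1])
--     for byte_val in range(128, 255):
--         if byte_val not in used_bytes: return byte_val
--     return None
-- ===== SOURCE B (Python) =====
-- def find_substitution_byte(data, pair_to_replace):
--     used_bytes = set(data)
--     if pair_to_replace:
--         used_bytes.add(pair_to_replace[0])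
--         used_bytes.add(pair_to_replace[1])
--     candidates = set(range(128, 255)) - used_bytes
--     return min(candidates) if candidates else None
-- ===== Notes on version B (the rewrite author's own statement) =====
-- stated objective: simpler
-- what changed: The sequential scan over range(128,255) with an early return is replaced by a set difference set(range(128,255)) - used_bytes followed by min (or None when empty).
import Mathlib
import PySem

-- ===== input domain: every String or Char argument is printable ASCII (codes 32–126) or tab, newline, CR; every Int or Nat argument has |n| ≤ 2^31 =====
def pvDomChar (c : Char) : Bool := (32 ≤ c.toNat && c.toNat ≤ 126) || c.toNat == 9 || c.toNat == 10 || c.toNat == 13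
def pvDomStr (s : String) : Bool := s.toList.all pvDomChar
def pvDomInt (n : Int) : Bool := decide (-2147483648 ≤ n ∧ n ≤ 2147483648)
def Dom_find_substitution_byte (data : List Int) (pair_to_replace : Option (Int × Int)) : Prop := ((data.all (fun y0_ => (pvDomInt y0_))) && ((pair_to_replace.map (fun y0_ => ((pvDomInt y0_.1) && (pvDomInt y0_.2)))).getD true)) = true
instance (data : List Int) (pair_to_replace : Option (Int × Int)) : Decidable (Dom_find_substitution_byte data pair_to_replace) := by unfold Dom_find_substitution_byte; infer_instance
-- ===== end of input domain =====

-- B replaces A's early-return scan over range(128,255) by a set difference followed by min (simpler decomposition, same cost).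

-- ===== PORT A =====
-- used set as A builds it (shared literal build: set(data) plus the two adds under the truthiness test)
def pvUsed (data : List Int) (pair_to_replace : Option (Int × Int)) : PySem.Set Int :=
  let used_bytes := PySem.Set.ofList data
  match pair_to_replace with
  | some p => PySem.Set.add (PySem.Set.add used_bytes p.1) p.2
  | none => used_bytes

-- A's 'for byte_val in range(128,255): if byte_val not in used_bytes: return byte_val' / 'return None'
def pvScan (used : PySem.Set Int) : List Int → Option Int
  | [] => none
  | b :: rest => if !(PySem.Set.contains used b) then some b else pvScan used rest

def find_substitution_byte (data : List Int) (pair_to_replace : Option (Int × Int)) : Option Int :=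
  pvScan (pvUsed data pair_to_replace) (PySem.List.pyRange 128 255 1)

-- ===== PORT B =====
def find_substitution_byte_alt (data : List Int) (pair_to_replace : Option (Int × Int)) : Option Int :=
  let used_bytes := pvUsed data pair_to_replace
  let candidates := PySem.Set.diff (PySem.Set.ofList (PySem.List.pyRange 128 255 1)) used_bytes
  if candidates = [] then none else PySem.List.min? candidates (fun x => x)

-- ===== PRECONDITION & SPEC =====
def Spec_find_substitution_byte (data : List Int) (pair_to_replace : Option (Int × Int)) (out : Option Int) : Prop := out = find_substitution_byte_alt data pair_to_replace
instance (data : List Int) (pair_to_replace : Option (Int × Int)) (out : Option Int) : Decidable (Spec_find_substitution_byte data pair_to_replace out) := by unfold Spec_find_substitution_byte; infer_instance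

-- ===== CLAIM (what is proved, stated in full; the proofs are below) =====
def Claim_equal_find_substitution_byte : Prop := ∀ (data : List Int) (pair_to_replace : Option (Int × Int)), Dom_find_substitution_byte data pair_to_replace → Spec_find_substitution_byte data pair_to_replace (find_substitution_byte data pair_to_replace)

-- ===== LEMMAS AND PROOFS =====

-- A's scan is: first element of the kept sublist
theorem pvScan_eq_head_filter (used : PySem.Set Int) (l : List Int) :
    pvScan used l = (l.filter (fun b => !(PySem.Set.contains used b))).head? := by
  induction l with
  | nil => rfl
  | cons b rest ih =>
    simp only [pvScan, List.filter_cons]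
    by_cases h : b ∈ used
    · simp [h, ih]
    · simp [h]

theorem pvFoldlMin (x : Int) (t : List Int) (h : ∀ y ∈ t, x ≤ y) : t.foldl min x = x := by
  induction t generalizing x with
  | nil => rfl
  | cons y t ih =>
    simp only [List.foldl_cons]
    have hxy : min x y = x := min_eq_left (h y (by simp))
    rw [hxy]
    exact ih x (fun z hz => h z (by simp [hz]))

-- min? of a strictly increasing list is its head
theorem pvMinHead (l : List Int) (hp : l.Pairwise (· < ·)) :
    PySem.List.min? l (fun x => x) = l.head? := by
  cases l with
  | nil => rfl
  | cons x t =>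
    rw [PySem.List.min?_id_cons]
    simp only [List.head?_cons, Option.some.injEq]
    exact pvFoldlMin x t (fun y hy => le_of_lt ((List.pairwise_cons.mp hp).1 y hy))

theorem find_substitution_byte_eq (data : List Int) (pair_to_replace : Option (Int × Int)) :
    find_substitution_byte data pair_to_replace = find_substitution_byte_alt data pair_to_replace := by
  unfold find_substitution_byte find_substitution_byte_alt
  set used := pvUsed data pair_to_replace with hu
  have hr : PySem.Set.ofList (PySem.List.pyRange 128 255 1) = PySem.List.pyRange 128 255 1 :=
    PySem.Set.ofList_eq_self_of_nodup _ (PySem.List.nodup_pyRange_one 128 255)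
  simp only [PySem.Set.diff, hr]
  set cands := (PySem.List.pyRange 128 255 1).filter (fun x => !(PySem.Set.contains used x)) with hc
  have hpc : cands.Pairwise (· < ·) :=
    (PySem.List.pairwise_lt_pyRange_one 128 255).filter _
  rw [pvScan_eq_head_filter]
  simp only [PySem.Set.contains] at hc ⊢
  rw [← hc, pvMinHead cands hpc]
  by_cases hE : cands = []
  · simp [hE]
  · simp [hE]

-- ===== VERDICT (by name: the statement is the Claim_ definition above) =====
theorem find_substitution_byte_spec : Claim_equal_find_substitution_byte := by
  intro data p _
  unfold Spec_find_substitution_byte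
  exact find_substitution_byte_eq data p
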